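-- pv_equiv track=rewrite | github.com/Vijay11-08/All-In-One-Directory | One Pattern/Star Number Patterns/print_patterns.py | hollow_hourglass
-- ===== SOURCE A (Python) =====
-- def hollow_hourglass(n: int) -> str:
--     """Hollow outline hourglass."""
--     w = 2 * n - 1
--     lines: list[str] = []
--     for i in range(n, 0, -1):
--         if i == n:
--             lines.append(" ".join("*" * n))
--         elif i == 1:
--             lines.append("*".center(w))
--         else:
--             inner = 2 * i - 3
--             lines.append(("*" + " " * inner + "*").center(w))
--     for i in range(2, n + 1):
--         if i == n:
--             lines.append(" ".join("*" * n))
--         elif i == 1: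
--             lines.append("*".center(w))
--         else:
--             inner = 2 * i - 3
--             lines.append(("*" + " " * inner + "*").center(w))
--     return "\n".join(lines)
-- ===== SOURCE B (Python) =====
-- def hollow_hourglass(n: int) -> str:
--     """Hollow outline hourglass, built as a character grid: each row is a blank
--     buffer with stars placed at closed-form positions (border rows: every even
--     column; other rows: columns n-i and n+i-2)."""
--     w = 2 * n - 1
--     rows = []
--     for r in range(w):
--         i = n - r if r < n else r - n + 2
--         if i == n:
--             rows.append("".join("*" if c % 2 == 0 else " " for c in range(w)))
--         else:
--             row = [" "] * w
--             row[n - i] = "*"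
--             row[n + i - 2] = "*"
--             rows.append("".join(row))
--     return "\n".join(rows)
-- ===== Notes on version B (the rewrite author's own statement) =====
-- stated objective: alternative
-- what changed: B never centers or mirrors strings: it renders the whole (2n-1)-row grid in one loop from closed-form star positions per row (border rows: every even column; hollow rows: a blank buffer with stars set at columns n-i and n+i-2), instead of A's two loops building each row by ' '.join / str.center.
import Mathlib
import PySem

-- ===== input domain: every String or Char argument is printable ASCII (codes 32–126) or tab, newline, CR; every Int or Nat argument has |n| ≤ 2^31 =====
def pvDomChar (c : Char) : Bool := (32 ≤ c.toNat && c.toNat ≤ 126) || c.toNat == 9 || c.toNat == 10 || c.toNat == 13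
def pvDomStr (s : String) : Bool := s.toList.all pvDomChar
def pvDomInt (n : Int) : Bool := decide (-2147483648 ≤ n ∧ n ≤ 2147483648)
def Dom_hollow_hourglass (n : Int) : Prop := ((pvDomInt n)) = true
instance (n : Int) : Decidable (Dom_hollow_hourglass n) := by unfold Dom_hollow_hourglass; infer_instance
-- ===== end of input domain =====

-- B renders the grid from a closed-form per-cell predicate (one loop over all row indices)
-- instead of A's center/join string building over two loops; equivalence proved for all n.

-- ===== PORT A =====
-- s.center(w) for List Char, exact CPython semantics: if the margin is positive,
-- left pad = marg // 2 + (marg & w & 1); here marg > 0 and (since s is nonempty) w > 0,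
-- so the bit term is 1 iff both marg and w are odd.
def pyCenter (s : List Char) (w : Int) : List Char :=
  let marg := w - (s.length : Int)
  if marg ≤ 0 then s
  else
    let left := PySem.Int.floordiv marg 2 +
      (if PySem.Int.mod marg 2 = 1 ∧ PySem.Int.mod w 2 = 1 then 1 else 0)
    List.replicate left.toNat ' ' ++ s ++ List.replicate (marg - left).toNat ' '

def hollow_hourglass (n : Int) : String :=
  let w := 2 * n - 1
  let lines : List (List Char) := []
  let lines := (PySem.List.pyRange n 0 (-1)).foldl (fun lines i =>
    if i = n then
      lines ++ [PySem.Chars.join [' '] ((PySem.List.pyRepeat ['*'] n).map (fun c => [c]))]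
    else if i = 1 then
      lines ++ [pyCenter ['*'] w]
    else
      let inner := 2 * i - 3
      lines ++ [pyCenter (['*'] ++ PySem.List.pyRepeat [' '] inner ++ ['*']) w]) lines
  let lines := (PySem.List.pyRange 2 (n + 1) 1).foldl (fun lines i =>
    if i = n then
      lines ++ [PySem.Chars.join [' '] ((PySem.List.pyRepeat ['*'] n).map (fun c => [c]))]
    else if i = 1 then
      lines ++ [pyCenter ['*'] w]
    else
      let inner := 2 * i - 3
      lines ++ [pyCenter (['*'] ++ PySem.List.pyRepeat [' '] inner ++ ['*']) w]) lines
  String.ofList (PySem.Chars.join ['\n'] lines)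

-- ===== PORT B =====
def hollow_hourglass_alt (n : Int) : String :=
  let w := 2 * n - 1
  let rows := (PySem.List.pyRange 0 w 1).map (fun r =>
    let i := if r < n then n - r else r - n + 2
    if i = n then
      (PySem.List.pyRange 0 w 1).map (fun c => if PySem.Int.mod c 2 = 0 then '*' else ' ')
    else
      let row := PySem.List.pyRepeat [' '] w
      let row := PySem.List.pySetD row (n - i) '*'
      let row := PySem.List.pySetD row (n + i - 2) '*'
      row)
  String.ofList (PySem.Chars.join ['\n'] rows)

-- ===== PRECONDITION & SPEC =====
def Spec_hollow_hourglass (n : Int) (out : String) : Prop := out = hollow_hourglass_alt n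
instance (n : Int) (out : String) : Decidable (Spec_hollow_hourglass n out) := by unfold Spec_hollow_hourglass; infer_instance

-- ===== CLAIM (what is proved, stated in full; the proofs are below) =====
def Claim_equal_hollow_hourglass : Prop := ∀ (n : Int), Dom_hollow_hourglass n → Spec_hollow_hourglass n (hollow_hourglass n)

-- ===== LEMMAS AND PROOFS =====

-- A's per-iteration row (the shared body of both of A's loops).
def hhRow (n w i : Int) : List Char :=
  if i = n then PySem.Chars.join [' '] ((PySem.List.pyRepeat ['*'] n).map (fun c => [c]))
  else if i = 1 then pyCenter ['*'] w
  else pyCenter (['*'] ++ PySem.List.pyRepeat [' '] (2 * i - 3) ++ ['*']) w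

-- B's per-row grid rendering, keyed by A's row index i.
def hhGrid (n w i : Int) : List Char :=
  if i = n then (PySem.List.pyRange 0 w 1).map (fun c => if PySem.Int.mod c 2 = 0 then '*' else ' ')
  else PySem.List.pySetD (PySem.List.pySetD (PySem.List.pyRepeat [' '] w) (n - i) '*') (n + i - 2) '*'

theorem foldl_app_singleton {α β : Type} (f : α → List β) (l : List α) (init : List (List β)) :
    l.foldl (fun acc x => acc ++ [f x]) init = init ++ l.map f := by
  induction l generalizing init with
  | nil => simp
  | cons x xs ih => simp [List.foldl_cons, ih]

theorem hh_fold_eq (n w : Int) (r : List Int) (init : List (List Char)) :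
    r.foldl (fun lines i =>
      if i = n then
        lines ++ [PySem.Chars.join [' '] ((PySem.List.pyRepeat ['*'] n).map (fun c => [c]))]
      else if i = 1 then
        lines ++ [pyCenter ['*'] w]
      else
        let inner := 2 * i - 3
        lines ++ [pyCenter (['*'] ++ PySem.List.pyRepeat [' '] inner ++ ['*']) w]) init
    = init ++ r.map (hhRow n w) := by
  have hb : (fun (lines : List (List Char)) (i : Int) =>
      if i = n then
        lines ++ [PySem.Chars.join [' '] ((PySem.List.pyRepeat ['*'] n).map (fun c => [c]))]
      else if i = 1 then
        lines ++ [pyCenter ['*'] w]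
      else
        let inner := 2 * i - 3
        lines ++ [pyCenter (['*'] ++ PySem.List.pyRepeat [' '] inner ++ ['*']) w])
      = (fun lines i => lines ++ [hhRow n w i]) := by
    funext lines i
    simp only [hhRow]
    split_ifs <;> rfl
  rw [hb, foldl_app_singleton]

-- The top border " ".join("*"*m) as a parity predicate over column indices.
theorem topRow_eq (m : Nat) (hm : 1 ≤ m) :
    PySem.Chars.join [' '] ((List.replicate m '*').map (fun c => [c]))
      = (List.range (2 * m - 1)).map (fun k => if k % 2 = 0 then '*' else ' ') := by
  induction m with
  | zero => omega
  | succ m ih =>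
    rcases Nat.eq_or_lt_of_le hm with h1 | h1
    · simp [← h1, PySem.Chars.join_singleton, List.range_succ]
    · have hm' : 1 ≤ m := by omega
      have hrep : List.replicate (m + 1) '*' = '*' :: List.replicate m '*' := rfl
      have hne : (List.replicate m '*').map (fun c => [c]) ≠ [] := by
        simp; omega
      obtain ⟨q, rest, hq⟩ : ∃ q rest, (List.replicate m '*').map (fun c => [c]) = q :: rest := by
        cases hx : (List.replicate m '*').map (fun c => [c]) with
        | nil => exact absurd hx hne
        | cons q rest => exact ⟨q, rest, rfl⟩
      have hL : PySem.Chars.join [' '] ((List.replicate (m + 1) '*').map (fun c => [c]))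
          = '*' :: ' ' :: PySem.Chars.join [' '] ((List.replicate m '*').map (fun c => [c])) := by
        rw [hrep, List.map_cons, hq, PySem.Chars.join_cons_cons, ← hq]
        rfl
      rw [hL, ih hm']
      have h2 : 2 * (m + 1) - 1 = (2 * m - 1) + 1 + 1 := by omega
      rw [h2, List.range_succ_eq_map, List.range_succ_eq_map]
      simp only [List.map_cons, List.map_map]
      norm_num
      intro k _
      split_ifs <;> first | rfl | omega

-- Placing one star into a blank buffer.
theorem setOne_eq (a w : Nat) (ha : a < w) :
    (List.replicate w ' ').set a '*'
      = List.replicate a ' ' ++ ['*'] ++ List.replicate (w - 1 - a) ' ' := by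
  apply List.ext_getElem
  · simp; omega
  · intro j h1 h2
    simp only [List.length_set, List.length_replicate] at h1
    simp only [List.getElem_set, List.getElem_replicate, List.getElem_append,
      List.length_replicate, List.length_append, List.length_cons, List.length_nil]
    split_ifs <;> simp_all
    all_goals omega

-- Placing two distinct stars into a blank buffer.
theorem setTwo_eq (a b w : Nat) (hab : a < b) (hbw : b < w) :
    ((List.replicate w ' ').set a '*').set b '*'
      = List.replicate a ' ' ++ ['*'] ++ List.replicate (b - a - 1) ' ' ++ ['*'] ++
        List.replicate (w - 1 - b) ' ' := by
  apply List.ext_getElem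
  · simp; omega
  · intro j h1 h2
    simp only [List.length_set, List.length_replicate] at h1
    simp only [List.getElem_set, List.getElem_replicate, List.getElem_append,
      List.length_replicate, List.length_append, List.length_cons, List.length_nil]
    split_ifs <;> simp_all
    all_goals omega

-- row[i] = v for a nonnegative in-range index is List.set.
theorem pySetD_toNat (xs : List Char) (i : Int) (v : Char) (h0 : 0 ≤ i)
    (h : i < (xs.length : Int)) :
    PySem.List.pySetD xs i v = xs.set i.toNat v := by
  have hnat : i.toNat < xs.length := by omega
  have hs : PySem.List.pySet? xs i v = some (xs.set i.toNat v) := by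
    rw [show i = ((i.toNat : Nat) : Int) from by omega]
    exact PySem.List.pySet?_natCast xs i.toNat v hnat
  unfold PySem.List.pySetD
  rw [hs]
  rfl

-- Python's fmod/fdiv facts used for the even margins of .center.
theorem fdiv_two_mul (k : Int) : PySem.Int.floordiv (2 * k) 2 = k := by
  simp only [PySem.Int.floordiv]
  exact Int.mul_fdiv_cancel_left k (by norm_num)

theorem fmod_two_mul (k : Int) : PySem.Int.mod (2 * k) 2 = 0 := by
  simp only [PySem.Int.mod]
  simp [Int.fmod_eq_emod]

-- The heart of the proof: A's row i equals B's grid row for 1 ≤ i ≤ n.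
theorem row_eq_grid (n i : Int) (h1 : 1 ≤ i) (h2 : i ≤ n) :
    hhRow n (2 * n - 1) i = hhGrid n (2 * n - 1) i := by
  have hn : 1 ≤ n := le_trans h1 h2
  by_cases hin : i = n
  · -- top border row
    subst hin
    simp only [hhRow, hhGrid]
    rw [PySem.List.pyRepeat_singleton, topRow_eq i.toNat (by omega),
      PySem.List.pyRange_one, List.map_map]
    have hw : (2 * i - 1 - 0).toNat = 2 * i.toNat - 1 := by omega
    rw [hw]
    apply List.map_congr_left
    intro k _
    simp only [Function.comp]
    have : k % 2 = 0 ↔ PySem.Int.mod ((0:Int) + (k:Int)) 2 = 0 := by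
      simp only [PySem.Int.mod, Int.fmod_eq_emod]
      omega
    rw [if_congr this rfl rfl]
  · -- hollow rows (including the center)
    have hiltn : i < n := lt_of_le_of_ne h2 hin
    have hn2 : 2 ≤ n := by omega
    simp only [hhRow, hhGrid, if_neg hin]
    by_cases hi1 : i = 1
    · -- central single star: the two positions coincide
      subst hi1
      rw [if_pos rfl]
      simp only [PySem.List.pyRepeat_singleton]
      rw [pySetD_toNat (List.replicate (2*n-1).toNat ' ') (n-1) '*' (by omega) (by simp; omega)]
      rw [pySetD_toNat _ (n+1-2) '*' (by omega) (by simp; omega)]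
      have hsame : (n + 1 - 2).toNat = (n - 1).toNat := by omega
      rw [hsame, List.set_set, setOne_eq (n-1).toNat (2*n-1).toNat (by omega)]
      have hmarg : (2 * n - 1) - (((['*'] : List Char).length : Nat) : Int) = 2 * (n - 1) := by
        simp
        ring
      simp only [pyCenter, hmarg]
      rw [if_neg (by omega : ¬(2 * (n - 1) ≤ 0)), fmod_two_mul, fdiv_two_mul,
        if_neg (by simp : ¬((0:Int) = 1 ∧ PySem.Int.mod (2*n-1) 2 = 1)), add_zero]
      have e2 : (2 * (n - 1) - (n - 1)).toNat = (n - 1).toNat := by omega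
      have e3 : (2 * n - 1).toNat - 1 - (n - 1).toNat = (n - 1).toNat := by omega
      rw [e2, e3]
    · -- generic hollow row: two distinct stars
      have hi2 : 2 ≤ i := by omega
      rw [if_neg hi1]
      simp only [PySem.List.pyRepeat_singleton]
      rw [pySetD_toNat (List.replicate (2*n-1).toNat ' ') (n-i) '*' (by omega) (by simp; omega)]
      rw [pySetD_toNat _ (n+i-2) '*' (by omega) (by simp; omega)]
      rw [setTwo_eq (n-i).toNat (n+i-2).toNat (2*n-1).toNat (by omega) (by omega)]
      have hlen : (2 * n - 1) - ((((['*'] ++ List.replicate (2 * i - 3).toNat ' ' ++ ['*']) : List Char).length : Nat) : Int)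
          = 2 * (n - i) := by
        simp
        omega
      simp only [pyCenter, hlen]
      rw [if_neg (by omega : ¬(2 * (n - i) ≤ 0)), fmod_two_mul, fdiv_two_mul,
        if_neg (by simp : ¬((0:Int) = 1 ∧ PySem.Int.mod (2*n-1) 2 = 1)), add_zero]
      have e2 : (2 * (n - i) - (n - i)).toNat = (n - i).toNat := by omega
      have e3 : (n + i - 2).toNat - (n - i).toNat - 1 = (2 * i - 3).toNat := by omega
      have e4 : (2 * n - 1).toNat - 1 - (n + i - 2).toNat = (n - i).toNat := by omega
      rw [e2, e3, e4]
      simp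

-- ===== VERDICT (by name: the statement is the Claim_ definition above) =====
theorem hollow_hourglass_spec : Claim_equal_hollow_hourglass := by
  intro n _
  unfold Spec_hollow_hourglass hollow_hourglass hollow_hourglass_alt
  simp only [hh_fold_eq, List.nil_append]
  by_cases hn : n ≤ 0
  · rw [PySem.List.pyRange_neg_one_eq_nil (by omega),
      PySem.List.pyRange_one_eq_nil (by omega : (n:Int) + 1 ≤ 2),
      PySem.List.pyRange_one_eq_nil (by omega : (2*n - 1:Int) ≤ 0)]
    rfl
  · -- n ≥ 1: split B's row range at n and match the two halves
    have hn1 : 1 ≤ n := by omega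
    have key : ∀ (f : Int → List Char),
        (PySem.List.pyRange 0 (2 * n - 1) 1).map f
          = (PySem.List.pyRange 0 n 1).map f ++ (PySem.List.pyRange n (2 * n - 1) 1).map f := by
      intro f
      rw [PySem.List.pyRange_one_append 0 n (2 * n - 1) (by omega) (by omega), List.map_append]
    rw [key]
    congr 2
    congr 1
    · -- descending half
      rw [PySem.List.pyRange_neg_one n 0, PySem.List.pyRange_one 0 n, List.map_map, List.map_map]
      have hw : (n - 0).toNat = n.toNat := by omega
      rw [hw]
      apply List.map_congr_left
      intro k hk
      simp only [List.mem_range] at hk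
      have hkn : (k : Int) < n := by omega
      simp only [Function.comp]
      rw [if_pos (by omega : (0:Int) + (k:Int) < n)]
      have harg : n - ((0:Int) + (k:Int)) = n - (k:Int) := by ring
      rw [harg]
      have := row_eq_grid n (n - (k:Int)) (by omega) (by omega)
      simpa [hhRow, hhGrid] using this
    · -- ascending half
      rw [PySem.List.pyRange_one n (2 * n - 1), PySem.List.pyRange_one 2 (n + 1),
        List.map_map, List.map_map]
      have hw : (2 * n - 1 - n).toNat = (n + 1 - 2).toNat := by omega
      rw [hw]
      apply List.map_congr_left
      intro k hk
      simp only [List.mem_range] at hk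
      simp only [Function.comp]
      rw [if_neg (by omega : ¬((n:Int) + (k:Int) < n))]
      have harg : n + (k:Int) - n + 2 = 2 + (k:Int) := by ring
      rw [harg]
      have := row_eq_grid n (2 + (k:Int)) (by omega) (by omega)
      simpa [hhRow, hhGrid] using this
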